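-- pv_equiv track=rewrite | github.com/roccomoresi/archivosImportantes | tpsProgra/tpsAlgYEstr/03/02.py | generarMatrizA
-- ===== SOURCE A (Python) =====
-- def generarMatrizA(matriz,n):
--     matriz = []
--     flag = 0
--     num = 1
--     for j in range(n):
--         fila = []
--         for i in range(n):
--             if i == flag:
--                 fila.append(num)
--                 num+=2
--             else:
--                 fila.append(0)
--         flag+=1
--
--         matriz.append(fila)
--     return matriz
-- ===== SOURCE B (Python) =====
-- def generarMatrizA(matriz, n):
--     # Each row k is built directly by concatenation: k zeros, the k-th odd
--     # number, then the remaining zeros -- no counters, no inner branch.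
--     return [[0] * k + [2 * k + 1] + [0] * (n - k - 1) for k in range(n)]
-- ===== Notes on version B (the rewrite author's own statement) =====
-- stated objective: simpler
-- what changed: Replaces the nested loop with flag/num running counters and a per-cell branch by a single comprehension that builds each row directly as zeros ++ [2k+1] ++ zeros.
import Mathlib
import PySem

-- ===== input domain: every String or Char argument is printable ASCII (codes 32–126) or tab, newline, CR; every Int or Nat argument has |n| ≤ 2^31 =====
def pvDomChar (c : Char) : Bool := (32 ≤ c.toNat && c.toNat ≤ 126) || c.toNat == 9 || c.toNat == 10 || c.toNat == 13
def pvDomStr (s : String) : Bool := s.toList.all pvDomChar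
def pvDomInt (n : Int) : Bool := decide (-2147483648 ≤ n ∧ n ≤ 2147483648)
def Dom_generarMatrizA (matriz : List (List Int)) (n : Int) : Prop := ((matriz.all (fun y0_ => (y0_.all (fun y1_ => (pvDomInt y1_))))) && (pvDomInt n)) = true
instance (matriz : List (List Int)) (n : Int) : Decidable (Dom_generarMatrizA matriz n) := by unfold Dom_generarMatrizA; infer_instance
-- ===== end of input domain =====

-- B builds each row by concatenation in one comprehension instead of A's nested
-- counter/branch loops; same result, simpler decomposition (not claimed faster).

-- ===== PORT A =====
-- literal port: state is (matriz, flag, num); inner loop state is (fila, num)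
def generarMatrizA (matriz : List (List Int)) (n : Int) : List (List Int) :=
  let s := (PySem.List.pyRange 0 n 1).foldl
    (fun (st : List (List Int) × Int × Int) _j =>
      let p := (PySem.List.pyRange 0 n 1).foldl
        (fun (p : List Int × Int) i =>
          if i = st.2.1 then (p.1 ++ [p.2], p.2 + 2) else (p.1 ++ [(0:Int)], p.2))
        ([], st.2.2)
      (st.1 ++ [p.1], st.2.1 + 1, p.2))
    ([], 0, 1)
  s.1

-- ===== PORT B =====
def generarMatrizA_alt (matriz : List (List Int)) (n : Int) : List (List Int) :=
  (PySem.List.pyRange 0 n 1).map (fun k =>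
    List.replicate k.toNat (0:Int) ++ [2 * k + 1] ++ List.replicate (n - k - 1).toNat (0:Int))

-- ===== PRECONDITION & SPEC =====
def Spec_generarMatrizA (matriz : List (List Int)) (n : Int) (out : List (List Int)) : Prop := out = generarMatrizA_alt matriz n
instance (matriz : List (List Int)) (n : Int) (out : List (List Int)) : Decidable (Spec_generarMatrizA matriz n out) := by unfold Spec_generarMatrizA; infer_instance

-- ===== CLAIM (what is proved, stated in full; the proofs are below) =====
def Claim_equal_generarMatrizA : Prop := ∀ (matriz : List (List Int)) (n : Int), Dom_generarMatrizA matriz n → Spec_generarMatrizA matriz n (generarMatrizA matriz n)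

-- ===== LEMMAS AND PROOFS =====

-- inner loop of A: appends one value per index, bumping num exactly when flag is hit
lemma innerA (flag : Int) (b : Int) : ∀ (k : Nat) (a num : Int) (acc : List Int), b - a = (k : Int) →
    (PySem.List.pyRange a b 1).foldl
      (fun (p : List Int × Int) i =>
        if i = flag then (p.1 ++ [p.2], p.2 + 2) else (p.1 ++ [(0:Int)], p.2))
      (acc, num)
    = (acc ++ (PySem.List.pyRange a b 1).map (fun i => if i = flag then num else 0),
       num + if a ≤ flag ∧ flag < b then 2 else 0) := by
  intro k
  induction k with
  | zero =>
    intro a num acc h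
    rw [PySem.List.pyRange_one_eq_nil (by omega)]
    simp
    omega
  | succ k ih =>
    intro a num acc h
    rw [PySem.List.pyRange_one_cons (a := a) (b := b) (by omega)]
    simp only [List.foldl_cons, List.map_cons]
    by_cases hfa : a = flag
    · subst hfa
      simp only [if_true]
      rw [ih (a+1) (num+2) (acc ++ [num]) (by omega)]
      have hmap : (PySem.List.pyRange (a+1) b 1).map (fun i => if i = a then num + 2 else 0)
          = (PySem.List.pyRange (a+1) b 1).map (fun i => if i = a then num else 0) := by
        apply List.map_congr_left
        intro i hi
        rw [PySem.List.mem_pyRange_one] at hi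
        rw [if_neg (show ¬ i = a by omega), if_neg (show ¬ i = a by omega)]
      rw [hmap]
      rw [if_pos (show a ≤ a ∧ a < b by omega), if_neg (show ¬(a + 1 ≤ a ∧ a < b) by omega)]
      simp
    · rw [if_neg (by omega)]
      rw [ih (a+1) num (acc ++ [0]) (by omega)]
      have hc : (a + 1 ≤ flag ∧ flag < b) ↔ (a ≤ flag ∧ flag < b) := by
        constructor <;> intro hx <;> exact ⟨by omega, hx.2⟩
      simp only [hc, if_neg (show ¬ a = flag from hfa)]
      simp

-- outer loop of A: flag tracks the row index, num = 2*flag + 1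
lemma outerA (n : Int) : ∀ (k : Nat) (c : Int) (m : List (List Int)), 0 ≤ c → n - c = (k : Int) →
    ((PySem.List.pyRange c n 1).foldl
      (fun (st : List (List Int) × Int × Int) _j =>
        let p := (PySem.List.pyRange 0 n 1).foldl
          (fun (p : List Int × Int) i =>
            if i = st.2.1 then (p.1 ++ [p.2], p.2 + 2) else (p.1 ++ [(0:Int)], p.2))
          ([], st.2.2)
        (st.1 ++ [p.1], st.2.1 + 1, p.2))
      (m, c, 2 * c + 1)).1
    = m ++ (PySem.List.pyRange c n 1).map
        (fun j => (PySem.List.pyRange 0 n 1).map (fun i => if i = j then 2 * j + 1 else 0)) := by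
  intro k
  induction k with
  | zero =>
    intro c m hc h
    rw [PySem.List.pyRange_one_eq_nil (a := c) (b := n) (by omega)]
    simp only [List.foldl_nil, List.map_nil, List.append_nil]
  | succ k ih =>
    intro c m hc h
    rw [PySem.List.pyRange_one_cons (a := c) (b := n) (by omega)]
    simp only [List.foldl_cons, List.map_cons]
    rw [innerA c n (n.toNat) 0 (2*c+1) [] (by omega)]
    rw [if_pos (show (0:Int) ≤ c ∧ c < n by omega)]
    simp only [List.nil_append]
    have : 2 * c + 1 + 2 = 2 * (c + 1) + 1 := by ring
    rw [this, ih (c+1) _ (by omega) (by omega), List.append_assoc, List.singleton_append]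

-- a row of A's canonical form equals B's concatenated row
lemma rowEq (n j : Int) (h0 : 0 ≤ j) (h1 : j < n) :
    (PySem.List.pyRange 0 n 1).map (fun i => if i = j then 2 * j + 1 else 0)
    = List.replicate j.toNat (0:Int) ++ [2 * j + 1] ++ List.replicate (n - j - 1).toNat (0:Int) := by
  rw [PySem.List.pyRange_one_append 0 j n h0 (by omega),
      PySem.List.pyRange_one_append j (j+1) n (by omega) (by omega),
      PySem.List.pyRange_one_singleton]
  simp only [List.map_append]
  have hleft : (PySem.List.pyRange 0 j 1).map (fun i => if i = j then 2 * j + 1 else 0)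
      = List.replicate j.toNat (0:Int) := by
    rw [List.map_congr_left (g := fun _ => (0:Int)) ?_, List.map_const']
    · rw [PySem.List.length_pyRange_one]; simp
    · intro i hi; rw [PySem.List.mem_pyRange_one] at hi; rw [if_neg (by omega)]
  have hright : (PySem.List.pyRange (j+1) n 1).map (fun i => if i = j then 2 * j + 1 else 0)
      = List.replicate (n - j - 1).toNat (0:Int) := by
    rw [List.map_congr_left (g := fun _ => (0:Int)) ?_, List.map_const']
    · rw [PySem.List.length_pyRange_one]; congr 1; omega
    · intro i hi; rw [PySem.List.mem_pyRange_one] at hi; rw [if_neg (by omega)]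
  rw [hleft, hright]
  simp

-- ===== VERDICT (by name: the statement is the Claim_ definition above) =====
theorem generarMatrizA_spec : Claim_equal_generarMatrizA := by
  intro matriz n _
  unfold Spec_generarMatrizA generarMatrizA generarMatrizA_alt
  by_cases hn : n ≤ 0
  · rw [PySem.List.pyRange_one_eq_nil (by omega)]
    simp
  · replace hn : 0 < n := by omega
    have h0 : (0:Int) = 2 * 0 + 1 - 1 := by ring
    have := outerA n n.toNat 0 [] le_rfl (by omega)
    simp only [mul_zero, zero_add] at this
    rw [this, List.nil_append]
    apply List.map_congr_left
    intro j hj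
    rw [PySem.List.mem_pyRange_one] at hj
    exact rowEq n j hj.1 hj.2
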